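-- pv_equiv track=rewrite | github.com/NatureBase/trading-assistant | backend/app/live_engine.py | _upsert_agg_feature_row
-- ===== SOURCE A (Python) =====
-- from typing import Any
--
-- def _upsert_agg_feature_row(
--     buffer: list[dict[str, Any]],
--     row: dict[str, Any],
--     open_time: int,
--     maxlen: int,
-- ) -> list[dict[str, Any]]:
--     row = dict(row)
--     row["open_time"] = int(open_time)
--
--     by_open_time: dict[int, dict[str, Any]] = {}
--
--     for item in buffer:
--         if "open_time" in item:
--             by_open_time[int(item["open_time"])] = item
--
--     by_open_time[int(open_time)] = row
--
--     out = sorted(by_open_time.values(), key=lambda x: int(x["open_time"]))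
--
--     if len(out) > maxlen:
--         out = out[-maxlen:]
--
--     buffer[:] = out
--     return buffer
-- ===== SOURCE B (Python) =====
-- def _upsert_agg_feature_row(buffer, row, open_time, maxlen):
--     new_row = dict(row)
--     new_row["open_time"] = int(open_time)
--
--     items = [item for item in buffer if "open_time" in item]
--     items.append(new_row)
--     items.sort(key=lambda x: int(x["open_time"]))
--
--     out = []
--     for item in items:
--         if out and int(out[-1]["open_time"]) == int(item["open_time"]):
--             out[-1] = item  # same open_time: the later item wins (new row sorts last among ties)
--         else:
--             out.append(item)
--
--     if len(out) > maxlen: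
--         out = out[-maxlen:]
--
--     buffer[:] = out
--     return buffer
-- ===== Notes on version B (the rewrite author's own statement) =====
-- stated objective: alternative
-- what changed: Replaces the dict-of-rows (last-wins upsert keyed by open_time, then sort of the values) with a dict-free pipeline: filter, one stable sort of the whole list with the new row appended last, and a single linear pass that collapses adjacent equal open_time entries keeping the last.
import Mathlib
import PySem

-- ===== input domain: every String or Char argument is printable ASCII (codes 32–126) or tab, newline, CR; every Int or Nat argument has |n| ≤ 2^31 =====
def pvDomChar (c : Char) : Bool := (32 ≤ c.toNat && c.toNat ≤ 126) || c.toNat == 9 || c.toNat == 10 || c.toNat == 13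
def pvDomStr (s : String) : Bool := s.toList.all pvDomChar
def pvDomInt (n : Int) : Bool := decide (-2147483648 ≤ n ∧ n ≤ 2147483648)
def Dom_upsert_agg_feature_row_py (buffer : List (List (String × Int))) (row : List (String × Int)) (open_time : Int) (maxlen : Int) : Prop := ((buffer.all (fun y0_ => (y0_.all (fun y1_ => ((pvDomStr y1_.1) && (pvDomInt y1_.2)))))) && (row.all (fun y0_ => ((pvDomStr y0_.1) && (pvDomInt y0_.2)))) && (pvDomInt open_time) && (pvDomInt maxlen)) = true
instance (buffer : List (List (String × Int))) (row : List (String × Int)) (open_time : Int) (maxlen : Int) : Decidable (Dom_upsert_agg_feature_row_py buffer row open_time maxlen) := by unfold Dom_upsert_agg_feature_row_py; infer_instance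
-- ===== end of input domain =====

-- B replaces A's dict-of-rows upsert with a dict-free filter + stable sort + linear collapse pass
-- (objective: alternative, same asymptotic cost). Both Pythons rebind buffer[:] in place; the
-- theorems below are about the RETURN value (the two Pythons perform the same mutation).

-- shared helper: int(x["open_time"]) — at every use site below the key is present, so the default 0 is never read
def pvRowTime (x : List (String × Int)) : Int :=
  ((PySem.Dict.mk x).get? "open_time").getD 0

-- ===== PORT A =====
def upsert_agg_feature_row_py (buffer : List (List (String × Int))) (row : List (String × Int)) (open_time : Int) (maxlen : Int) : List (List (String × Int)) :=
  -- row = dict(row); row["open_time"] = int(open_time)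
  let row2 := ((PySem.Dict.mk row).insert "open_time" open_time).items
  -- by_open_time = {}; for item in buffer: if "open_time" in item: by_open_time[int(item["open_time"])] = item
  let d : PySem.Dict Int (List (String × Int)) :=
    buffer.foldl (fun d item =>
      if (PySem.Dict.mk item).contains "open_time" then d.insert (pvRowTime item) item else d)
      (PySem.Dict.mk [])
  -- by_open_time[int(open_time)] = row
  let d := d.insert open_time row2
  -- out = sorted(by_open_time.values(), key=lambda x: int(x["open_time"]))
  let out := PySem.List.sorted d.values pvRowTime false
  -- if len(out) > maxlen: out = out[-maxlen:]
  let out := if maxlen < (out.length : Int) then PySem.List.slice out (some (-maxlen)) none else out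
  out

-- ===== PORT B =====
-- one step of B's collapse loop: replace out[-1] when it has the same open_time, else append
def pvCollapseStep (out : List (List (String × Int))) (item : List (String × Int)) : List (List (String × Int)) :=
  match out.getLast? with
  | some last => if pvRowTime last == pvRowTime item then out.dropLast ++ [item] else out ++ [item]
  | none => out ++ [item]

def upsert_agg_feature_row_py_alt (buffer : List (List (String × Int))) (row : List (String × Int)) (open_time : Int) (maxlen : Int) : List (List (String × Int)) :=
  -- new_row = dict(row); new_row["open_time"] = int(open_time)
  let new_row := ((PySem.Dict.mk row).insert "open_time" open_time).items
  -- items = [item for item in buffer if "open_time" in item]; items.append(new_row)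
  let items := (buffer.filter (fun item => (PySem.Dict.mk item).contains "open_time")) ++ [new_row]
  -- items.sort(key=lambda x: int(x["open_time"]))
  let items := PySem.List.sorted items pvRowTime false
  -- out = []; for item in items: replace-or-append
  let out := items.foldl pvCollapseStep []
  -- if len(out) > maxlen: out = out[-maxlen:]
  let out := if maxlen < (out.length : Int) then PySem.List.slice out (some (-maxlen)) none else out
  out

-- ===== PRECONDITION & SPEC =====
def Spec_upsert_agg_feature_row_py (buffer : List (List (String × Int))) (row : List (String × Int)) (open_time : Int) (maxlen : Int) (out : List (List (String × Int))) : Prop := out = upsert_agg_feature_row_py_alt buffer row open_time maxlen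
instance (buffer : List (List (String × Int))) (row : List (String × Int)) (open_time : Int) (maxlen : Int) (out : List (List (String × Int))) : Decidable (Spec_upsert_agg_feature_row_py buffer row open_time maxlen out) := by unfold Spec_upsert_agg_feature_row_py; infer_instance

-- ===== CLAIM (what is proved, stated in full; the proofs are below) =====
def Claim_equal_upsert_agg_feature_row_py : Prop := ∀ (buffer : List (List (String × Int))) (row : List (String × Int)) (open_time : Int) (maxlen : Int), Dom_upsert_agg_feature_row_py buffer row open_time maxlen → Spec_upsert_agg_feature_row_py buffer row open_time maxlen (upsert_agg_feature_row_py buffer row open_time maxlen)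

-- ===== LEMMAS AND PROOFS =====

-- the filter "rows whose open_time is k"
def pvPk (k : Int) (v : List (String × Int)) : Bool := pvRowTime v == k

-- a list with pairwise-distinct open_times has at most one row per time, so a time-filter is its own last element
theorem pv_single {l : List (List (String × Int))} (h : (l.map pvRowTime).Nodup) (k : Int) :
    l.filter (pvPk k) = ((l.filter (pvPk k)).getLast?).toList := by
  have hsub : ((l.filter (pvPk k)).map pvRowTime).Nodup :=
    h.sublist ((List.filter_sublist (l := l)).map pvRowTime)
  match hf : l.filter (pvPk k) with
  | [] => rfl
  | [a] => rfl
  | a :: b :: t =>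
    exfalso
    have ha : pvPk k a = true := List.of_mem_filter (hf ▸ List.mem_cons_self)
    have hb : pvPk k b = true := List.of_mem_filter (hf ▸ List.mem_cons_of_mem a List.mem_cons_self)
    rw [hf] at hsub
    simp [List.nodup_cons, pvPk] at hsub ha hb
    exact hsub.1.1 (ha.trans hb.symm)

-- rows stored under a dict key other than k never pass the k-filter (given the key invariant)
theorem pv_filterNone {k : Int} : ∀ (l : List (Int × List (String × Int))),
    (∀ p ∈ l, p.1 = pvRowTime p.2) → k ∉ l.map Prod.fst →
    (l.map Prod.snd).filter (pvPk k) = [] := by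
  intro l hinv hk
  rw [List.filter_eq_nil_iff]
  intro v hv
  simp only [List.mem_map] at hv
  obtain ⟨p, hp, rfl⟩ := hv
  have := hinv p hp
  simp only [pvPk, ← this]
  intro hEq
  exact hk (List.mem_map.mpr ⟨p, hp, by simpa using hEq⟩)

-- overwrite-in-place on the items list, seen through values-then-filter
theorem pv_VIaux {x : List (String × Int)} {k : Int} : ∀ (l : List (Int × List (String × Int))),
    (l.map Prod.fst).Nodup → (∀ p ∈ l, p.1 = pvRowTime p.2) →
    ((l.map (fun p => if p.1 == pvRowTime x then (pvRowTime x, x) else p)).map Prod.snd).filter (pvPk k)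
      = if k = pvRowTime x then (if l.any (fun p => p.1 == pvRowTime x) then [x] else [])
        else (l.map Prod.snd).filter (pvPk k) := by
  intro l
  induction l with
  | nil => simp
  | cons p l ih =>
    intro hnd hinv
    have hinv' : ∀ q ∈ l, q.1 = pvRowTime q.2 := fun q hq => hinv q (List.mem_cons_of_mem p hq)
    have hnd' : (l.map Prod.fst).Nodup := (List.nodup_cons.mp (by simpa using hnd)).2
    have hpkey : p.1 = pvRowTime p.2 := hinv p List.mem_cons_self
    by_cases hp : p.1 = pvRowTime x
    · -- head is replaced by (pvRowTime x, x)
      have hnotin : pvRowTime x ∉ l.map Prod.fst := by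
        rw [← hp]; exact (List.nodup_cons.mp (by simpa using hnd)).1
      have hmapid : l.map (fun q => if q.1 == pvRowTime x then (pvRowTime x, x) else q) = l := by
        rw [List.map_congr_left (g := id) ?_, List.map_id]
        intro q hq
        have : q.1 ≠ pvRowTime x := fun h => hnotin (h ▸ List.mem_map.mpr ⟨q, hq, rfl⟩)
        simp [this]
      simp only [List.map_cons, hp, beq_self_eq_true, if_true, hmapid, List.filter_cons]
      by_cases hk : k = pvRowTime x
      · subst hk
        have htail : (l.map Prod.snd).filter (pvPk (pvRowTime x)) = [] := pv_filterNone l hinv' hnotin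
        simp [pvPk, htail, hp]
      · have hx2 : pvPk k x = false := by simp [pvPk]; omega
        have hp2 : pvPk k p.2 = false := by simp [pvPk]; rw [← hpkey, hp]; omega
        simp [hk, hx2, hp2]
    · have hpbeq : (p.1 == pvRowTime x) = false := by simpa using hp
      simp only [List.map_cons, hpbeq, List.filter_cons, List.any_cons,
        ih hnd' hinv', Bool.false_or]
      by_cases hk : k = pvRowTime x
      · subst hk
        have hp2 : pvPk (pvRowTime x) p.2 = false := by simp [pvPk]; rw [← hpkey]; omega
        simp [hp2]
      · simp [hk]

-- inserting x at its own open_time: the k-filter of the values becomes [x] at that time, is untouched elsewhere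
theorem pv_VI (d : PySem.Dict Int (List (String × Int))) (x : List (String × Int)) (k : Int)
    (hnd : d.keys.Nodup) (hinv : ∀ p ∈ d.items, p.1 = pvRowTime p.2) :
    (d.insert (pvRowTime x) x).values.filter (pvPk k)
      = if k = pvRowTime x then [x] else d.values.filter (pvPk k) := by
  have hnd' : (d.items.map Prod.fst).Nodup := hnd
  by_cases hc : d.contains (pvRowTime x) = true
  · rw [show (d.insert (pvRowTime x) x).values
        = (d.items.map (fun p => if p.1 == pvRowTime x then (pvRowTime x, x) else p)).map Prod.snd by
      simp [PySem.Dict.values, PySem.Dict.items_insert_of_contains d x hc]]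
    rw [pv_VIaux d.items hnd' hinv]
    have hany : d.items.any (fun p => p.1 == pvRowTime x) = true := hc
    simp only [hany, if_true]
    rfl
  · rw [show (d.insert (pvRowTime x) x).values = d.values ++ [x] by
      simp [PySem.Dict.values, PySem.Dict.items_insert_of_not_contains d x (Bool.eq_false_iff.mpr hc)]]
    rw [List.filter_append]
    by_cases hk : k = pvRowTime x
    · rw [if_pos hk]
      have hnotin : k ∉ d.items.map Prod.fst := by
        intro hmem
        obtain ⟨p, hp, hpk⟩ := List.mem_map.mp hmem
        exact hc (List.any_eq_true.mpr ⟨p, hp, by simp [hpk, ← hk]⟩)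
      have h0 : d.values.filter (pvPk k) = [] := pv_filterNone d.items hinv hnotin
      have hx2 : pvPk k x = true := by simp [pvPk, hk]
      simp [h0, hx2]
    · have hx2 : pvPk k x = false := by simp [pvPk]; omega
      simp [hk, hx2]

-- the item-key invariant survives an upsert step
theorem pv_inv_step (d : PySem.Dict Int (List (String × Int))) (x : List (String × Int))
    (hinv : ∀ p ∈ d.items, p.1 = pvRowTime p.2) :
    ∀ p ∈ (d.insert (pvRowTime x) x).items, p.1 = pvRowTime p.2 := by
  intro p hp
  rcases (PySem.Dict.mem_items_insert d (pvRowTime x) x p).mp hp with rfl | ⟨hp', _⟩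
  · rfl
  · exact hinv p hp'

-- A's dict loop: the k-filter of the final values is the LAST element of d.values ++ S passing the filter
theorem pv_Achar (k : Int) : ∀ (S : List (List (String × Int))) (d : PySem.Dict Int (List (String × Int))),
    d.keys.Nodup → (∀ p ∈ d.items, p.1 = pvRowTime p.2) →
    (S.foldl (fun d x => d.insert (pvRowTime x) x) d).values.filter (pvPk k)
      = (((d.values ++ S).filter (pvPk k)).getLast?).toList := by
  intro S
  induction S with
  | nil =>
    intro d hnd hinv
    have hvk : d.values.map pvRowTime = d.keys := by
      simp only [PySem.Dict.values, PySem.Dict.keys, List.map_map]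
      exact List.map_congr_left (fun p hp => (hinv p hp).symm)
    simpa using pv_single (l := d.values) (hvk ▸ hnd) k
  | cons x S ih =>
    intro d hnd hinv
    rw [List.foldl_cons,
      ih (d.insert (pvRowTime x) x) (PySem.Dict.nodup_keys_insert d _ x hnd) (pv_inv_step d x hinv)]
    congr 1
    rw [List.filter_append, List.filter_append, pv_VI d x k hnd hinv]
    by_cases hk : k = pvRowTime x
    · subst hk
      have hx2 : pvPk (pvRowTime x) x = true := by simp [pvPk]
      simp only [List.filter_cons, hx2, if_true]
      rw [show (x :: S.filter (pvPk (pvRowTime x))) = [x] ++ S.filter (pvPk (pvRowTime x)) from rfl,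
        List.getLast?_append, List.getLast?_append, List.getLast?_append]
      cases h : (S.filter (pvPk (pvRowTime x))).getLast? <;> simp
    · have hx2 : pvPk k x = false := by simp [pvPk]; omega
      simp [hk, hx2]

theorem pv_nodup_of_pairwise_lt {l : List (List (String × Int))}
    (h : l.Pairwise (fun a b => pvRowTime a < pvRowTime b)) : (l.map pvRowTime).Nodup := by
  exact (List.pairwise_map.mpr h).imp (fun hlt => ne_of_lt hlt)

-- B's collapse loop: strictly increasing times, and per time the LAST element of out ++ ss survives
theorem pv_Gchar : ∀ (ss out : List (List (String × Int))),
    ss.Pairwise (fun a b => pvRowTime a ≤ pvRowTime b) →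
    out.Pairwise (fun a b => pvRowTime a < pvRowTime b) →
    (∀ a ∈ out, ∀ b ∈ ss, pvRowTime a ≤ pvRowTime b) →
    (ss.foldl pvCollapseStep out).Pairwise (fun a b => pvRowTime a < pvRowTime b) ∧
    ∀ k, (ss.foldl pvCollapseStep out).filter (pvPk k) = (((out ++ ss).filter (pvPk k)).getLast?).toList := by
  intro ss
  induction ss with
  | nil =>
    intro out _ hout _
    refine ⟨hout, fun k => ?_⟩
    simpa using pv_single (pv_nodup_of_pairwise_lt hout) k
  | cons x ss ih =>
    intro out hss hout hbd
    have hssx : ∀ b ∈ ss, pvRowTime x ≤ pvRowTime b := (List.pairwise_cons.mp hss).1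
    have hss' : ss.Pairwise (fun a b => pvRowTime a ≤ pvRowTime b) := (List.pairwise_cons.mp hss).2
    rw [List.foldl_cons]
    cases h : out.getLast? with
    | none =>
      have hnil : out = [] := List.getLast?_eq_none_iff.mp h
      have hstep : pvCollapseStep out x = [x] := by simp [pvCollapseStep, hnil]
      rw [hstep]
      obtain ⟨hpw, hfil⟩ := ih [x] hss' (List.pairwise_singleton _ _)
        (by intro a ha b hb; rcases List.mem_singleton.mp ha with rfl; exact hssx b hb)
      exact ⟨hpw, by simpa [hnil] using hfil⟩
    | some a =>
      have hsplit : out.dropLast ++ [a] = out := List.dropLast_append_getLast? a h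
      have hout2 : (out.dropLast ++ [a]).Pairwise (fun a b => pvRowTime a < pvRowTime b) := by
        rw [hsplit]; exact hout
      have hdl : out.dropLast.Pairwise (fun a b => pvRowTime a < pvRowTime b) :=
        (List.pairwise_append.mp hout2).1
      have hlt_a : ∀ b ∈ out.dropLast, pvRowTime b < pvRowTime a := by
        intro b hb
        exact (List.pairwise_append.mp hout2).2.2 b hb a (List.mem_singleton.mpr rfl)
      have hax_le : pvRowTime a ≤ pvRowTime x :=
        hbd a (List.mem_of_getLast? h) x List.mem_cons_self
      by_cases hax : pvRowTime a = pvRowTime x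
      · -- same open_time: out[-1] is replaced
        have hstep : pvCollapseStep out x = out.dropLast ++ [x] := by
          simp [pvCollapseStep, h, hax]
        rw [hstep]
        have hout' : (out.dropLast ++ [x]).Pairwise (fun a b => pvRowTime a < pvRowTime b) := by
          rw [List.pairwise_append]
          exact ⟨hdl, List.pairwise_singleton _ _, by
            intro b hb c hc; rcases List.mem_singleton.mp hc with rfl
            exact hax ▸ hlt_a b hb⟩
        have hbd' : ∀ a' ∈ out.dropLast ++ [x], ∀ b ∈ ss, pvRowTime a' ≤ pvRowTime b := by
          intro a' ha' b hb
          rcases List.mem_append.mp ha' with ha' | ha'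
          · exact hbd a' (hsplit ▸ List.mem_append_left [a] ha') b (List.mem_cons_of_mem x hb)
          · rcases List.mem_singleton.mp ha' with rfl; exact hssx b hb
        obtain ⟨hpw, hfil⟩ := ih (out.dropLast ++ [x]) hss' hout' hbd'
        refine ⟨hpw, fun k => ?_⟩
        rw [hfil k]
        congr 1
        conv_rhs => rw [← hsplit]
        simp only [List.append_assoc, List.cons_append,
          List.filter_append, List.getLast?_append]
        congr 1
        by_cases hka : pvPk k a = true
        · have hkx : pvPk k x = true := by
            simp [pvPk] at hka ⊢; omega
          simp only [List.nil_append, List.filter_cons, hka, hkx, if_true,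
            List.getLast?_cons_cons]
        · have hka' : pvPk k a = false := Bool.eq_false_iff.mpr (by simpa using hka)
          simp only [List.nil_append, List.filter_cons, hka']
          simp
      · -- different open_time: x is appended
        have hstep : pvCollapseStep out x = out ++ [x] := by
          simp [pvCollapseStep, h, hax]
        rw [hstep]
        have hout' : (out ++ [x]).Pairwise (fun a b => pvRowTime a < pvRowTime b) := by
          rw [List.pairwise_append]
          refine ⟨hout, List.pairwise_singleton _ _, ?_⟩
          intro b hb c hc; rcases List.mem_singleton.mp hc with rfl
          rcases (by rw [← hsplit] at hb; exact List.mem_append.mp hb) with hb' | hb'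
          · exact lt_of_lt_of_le (hlt_a b hb') hax_le
          · rcases List.mem_singleton.mp hb' with rfl
            exact lt_of_le_of_ne hax_le hax
        have hbd' : ∀ a' ∈ out ++ [x], ∀ b ∈ ss, pvRowTime a' ≤ pvRowTime b := by
          intro a' ha' b hb
          rcases List.mem_append.mp ha' with ha' | ha'
          · exact hbd a' ha' b (List.mem_cons_of_mem x hb)
          · rcases List.mem_singleton.mp ha' with rfl; exact hssx b hb
        obtain ⟨hpw, hfil⟩ := ih (out ++ [x]) hss' hout' hbd'
        refine ⟨hpw, fun k => ?_⟩
        rw [hfil k]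
        congr 2
        rw [List.append_assoc]
        rfl

-- stability of PySem's sort, rows not at time k: the k-filter is untouched by an insertion
theorem pv_insertBy_filter_ne {x : List (String × Int)} {k : Int} (hx : pvPk k x = false) :
    ∀ l : List (List (String × Int)),
    (PySem.List.insertBy (fun a b => decide (pvRowTime a < pvRowTime b)) x l).filter (pvPk k) = l.filter (pvPk k) := by
  intro l
  induction l with
  | nil => simp [PySem.List.insertBy, hx]
  | cons y ys ih =>
    rw [PySem.List.insertBy.eq_def]
    by_cases h : pvRowTime x < pvRowTime y
    · simp [h, hx]
    · simp only [decide_eq_true_eq, h, if_false, List.filter_cons]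
      by_cases hy : pvPk k y = true
      · simp [hy, ih]
      · simp [hy, ih]

-- stability of PySem's sort, a row at time k: it is inserted AFTER every equal-time row
theorem pv_insertBy_filter_eq {x : List (String × Int)} {k : Int} (hx : pvPk k x = true) :
    ∀ l : List (List (String × Int)), l.Pairwise (fun a b => pvRowTime a ≤ pvRowTime b) →
    (PySem.List.insertBy (fun a b => decide (pvRowTime a < pvRowTime b)) x l).filter (pvPk k) = l.filter (pvPk k) ++ [x] := by
  intro l
  induction l with
  | nil => simp [PySem.List.insertBy, hx]
  | cons y ys ih =>
    intro hp
    have hk : pvRowTime x = k := by simpa [pvPk] using hx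
    rw [PySem.List.insertBy.eq_def]
    by_cases h : pvRowTime x < pvRowTime y
    · -- x goes in front: everything from y on has time > k, so nothing after x passes the filter
      have hys : ∀ z ∈ ys, pvRowTime y ≤ pvRowTime z := fun z hz => (List.pairwise_cons.mp hp).1 z hz
      have hnone : (y :: ys).filter (pvPk k) = [] := by
        rw [List.filter_eq_nil_iff]
        intro z hz
        rcases List.mem_cons.mp hz with rfl | hz'
        · simp [pvPk]; omega
        · have := hys z hz'
          simp [pvPk]; omega
      simp [h, hx, hnone]
    · simp only [decide_eq_true_eq, h, if_false, List.filter_cons,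
        ih (List.pairwise_cons.mp hp).2]
      by_cases hy : pvPk k y = true
      · simp [hy]
      · simp [hy]

-- PySem's sort is stable on each open_time class
theorem pv_sorted_filter (k : Int) (S : List (List (String × Int))) :
    (PySem.List.sorted S pvRowTime false).filter (pvPk k) = S.filter (pvPk k) := by
  rw [PySem.List.sorted_eq_foldl_insertBy]
  suffices h : ∀ (S acc : List (List (String × Int))),
      acc.Pairwise (fun a b => pvRowTime a ≤ pvRowTime b) →
      (S.foldl (fun acc x => PySem.List.insertBy (fun a b => decide (pvRowTime a < pvRowTime b)) x acc) acc).filter (pvPk k)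
        = acc.filter (pvPk k) ++ S.filter (pvPk k) by
    simpa using h S [] List.Pairwise.nil
  intro S
  induction S with
  | nil => intro acc _; simp
  | cons x S ih =>
    intro acc hacc
    rw [List.foldl_cons, ih _ (PySem.List.insertBy_pairwise_le pvRowTime x acc hacc)]
    by_cases hx : pvPk k x = true
    · rw [pv_insertBy_filter_eq hx acc hacc]
      simp [hx]
    · rw [pv_insertBy_filter_ne (Bool.eq_false_iff.mpr (by simpa using hx)) acc]
      simp [hx]

-- the upserted row's open_time is open_time
theorem pv_rowTime_row2 (row : List (String × Int)) (open_time : Int) :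
    pvRowTime ((PySem.Dict.mk row).insert "open_time" open_time).items = open_time := by
  have h : PySem.Dict.mk ((PySem.Dict.mk row).insert "open_time" open_time).items
      = (PySem.Dict.mk row).insert "open_time" open_time := rfl
  simp [pvRowTime, h, PySem.Dict.get?_insert_self]

-- the heart: sorted values of A's dict = B's collapse of the stably sorted list, for the same source S
theorem pv_main (S : List (List (String × Int))) :
    PySem.List.sorted ((S.foldl (fun d x => d.insert (pvRowTime x) x) (PySem.Dict.mk ([] : List (Int × List (String × Int))))).values) pvRowTime false
      = (PySem.List.sorted S pvRowTime false).foldl pvCollapseStep [] := by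
  have hss := PySem.List.sorted_pairwise S pvRowTime
  obtain ⟨hpw, hfil⟩ := pv_Gchar (PySem.List.sorted S pvRowTime false) []
    hss List.Pairwise.nil (by simp)
  apply PySem.List.sorted_eq_of_perm_of_pairwise_lt _ _ pvRowTime ?_ hpw
  rw [List.perm_iff_count]
  intro a
  have hpa : pvPk (pvRowTime a) a = true := by simp [pvPk]
  rw [← List.count_filter (p := pvPk (pvRowTime a)) hpa,
    ← List.count_filter (p := pvPk (pvRowTime a)) (l :=
      (S.foldl (fun d x => d.insert (pvRowTime x) x) (PySem.Dict.mk [])).values) hpa]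
  rw [hfil (pvRowTime a), List.nil_append, pv_sorted_filter,
    pv_Achar (pvRowTime a) S (PySem.Dict.mk []) (by simp [PySem.Dict.keys]) (by simp)]
  simp [PySem.Dict.values]

-- ===== VERDICT (by name: the statement is the Claim_ definition above) =====
theorem upsert_agg_feature_row_py_spec : Claim_equal_upsert_agg_feature_row_py := by
  intro buffer row open_time maxlen _
  unfold Spec_upsert_agg_feature_row_py upsert_agg_feature_row_py upsert_agg_feature_row_py_alt
  simp only []
  have hfold : buffer.foldl (fun d item =>
      if (PySem.Dict.mk item).contains "open_time" then d.insert (pvRowTime item) item else d)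
      (PySem.Dict.mk ([] : List (Int × List (String × Int))))
      = (buffer.filter (fun item => (PySem.Dict.mk item).contains "open_time")).foldl
          (fun d item => d.insert (pvRowTime item) item) (PySem.Dict.mk []) :=
    List.foldl_filter.symm
  have hkey : ((buffer.foldl (fun d item =>
      if (PySem.Dict.mk item).contains "open_time" then d.insert (pvRowTime item) item else d)
      (PySem.Dict.mk ([] : List (Int × List (String × Int))))).insert open_time
        ((PySem.Dict.mk row).insert "open_time" open_time).items)
      = ((buffer.filter (fun item => (PySem.Dict.mk item).contains "open_time"))
          ++ [((PySem.Dict.mk row).insert "open_time" open_time).items]).foldl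
          (fun d item => d.insert (pvRowTime item) item) (PySem.Dict.mk []) := by
    rw [List.foldl_append, List.foldl_cons, List.foldl_nil, ← hfold, pv_rowTime_row2]
  rw [hkey, pv_main]
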